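-- pv_equiv track=rewrite | github.com/Alex-Burgess/SudokuServerless | services/solvePuzzle/solve_puzzle/brute_force.py | convert_from_bf
-- ===== SOURCE A (Python) =====
-- def convert_from_bf(s):
--     new_list = []
--
--     counter = 0
--     tmp_list = []
--
--     for value in s:
--         if counter < 8:
--             tmp_list.append(value)
--             counter += 1
--         else:
--             tmp_list.append(value)
--             new_list.append(tmp_list)
--             tmp_list = []
--             counter = 0
--
--     return new_list
-- ===== SOURCE B (Python) =====
-- def convert_from_bf(s):
--     return [list(s[i * 9:i * 9 + 9]) for i in range(len(s) // 9)]
-- ===== Notes on version B (the rewrite author's own statement) =====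
-- stated objective: simpler
-- what changed: Replaces the counter/accumulator loop by a one-line comprehension that slices the sequence in strides of 9 over the number of complete rows, dropping the trailing remainder implicitly.
import Mathlib
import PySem

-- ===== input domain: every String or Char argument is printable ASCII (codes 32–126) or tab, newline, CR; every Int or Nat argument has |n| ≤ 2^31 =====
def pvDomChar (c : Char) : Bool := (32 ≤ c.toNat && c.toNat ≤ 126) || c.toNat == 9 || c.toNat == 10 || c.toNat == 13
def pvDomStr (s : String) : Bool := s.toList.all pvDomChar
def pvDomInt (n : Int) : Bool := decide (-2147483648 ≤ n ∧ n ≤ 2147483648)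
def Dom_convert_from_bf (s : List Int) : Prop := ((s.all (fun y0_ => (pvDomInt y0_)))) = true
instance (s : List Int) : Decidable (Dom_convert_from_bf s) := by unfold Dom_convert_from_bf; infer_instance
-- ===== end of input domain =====

-- B replaces A's counter/accumulator loop by a comprehension slicing the list in strides of 9 (simpler; same cost).

-- ===== PORT A =====
def stepA (st : List (List Int) × Int × List Int) (value : Int) : List (List Int) × Int × List Int :=
  if st.2.1 < 8 then (st.1, st.2.1 + 1, st.2.2 ++ [value])
  else (st.1 ++ [st.2.2 ++ [value]], 0, [])

def convert_from_bf (s : List Int) : List (List Int) :=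
  (s.foldl stepA ([], 0, [])).1

-- ===== PORT B =====
def convert_from_bf_alt (s : List Int) : List (List Int) :=
  (PySem.List.pyRange 0 (PySem.Int.floordiv (s.length : Int) 9) 1).map
    (fun i => PySem.List.slice s (some (i * 9)) (some (i * 9 + 9)))

-- ===== PRECONDITION & SPEC =====
def Spec_convert_from_bf (s : List Int) (out : List (List Int)) : Prop := out = convert_from_bf_alt s
instance (s : List Int) (out : List (List Int)) : Decidable (Spec_convert_from_bf s out) := by unfold Spec_convert_from_bf; infer_instance

-- ===== CLAIM (what is proved, stated in full; the proofs are below) =====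
def Claim_equal_convert_from_bf : Prop := ∀ (s : List Int), Dom_convert_from_bf s → Spec_convert_from_bf s (convert_from_bf s)

-- ===== LEMMAS AND PROOFS =====

/-- Chunks of exactly 9, dropping the remainder: common characterisation of both ports. -/
def chunks9 : List Int → List (List Int)
  | a::b::c::d::e::f::g::h::i::rest => [a,b,c,d,e,f,g,h,i] :: chunks9 rest
  | _ => []

theorem chunks9_short (l : List Int) (h : l.length ≤ 8) : chunks9 l = [] := by
  match l with
  | [] | [_] | [_,_] | [_,_,_] | [_,_,_,_] | [_,_,_,_,_] | [_,_,_,_,_,_]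
  | [_,_,_,_,_,_,_] | [_,_,_,_,_,_,_,_] => rfl
  | _::_::_::_::_::_::_::_::_::_ => simp at h; omega

theorem chunks9_cons8 (tmp : List Int) (h : tmp.length = 8) (v : Int) (rest : List Int) :
    chunks9 (tmp ++ v :: rest) = (tmp ++ [v]) :: chunks9 rest := by
  match tmp with
  | [_,_,_,_,_,_,_,_] => rfl
  | [] | [_] | [_,_] | [_,_,_] | [_,_,_,_] | [_,_,_,_,_] | [_,_,_,_,_,_]
  | [_,_,_,_,_,_,_] => simp at h
  | _::_::_::_::_::_::_::_::_::_ => simp at h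

theorem foldA_eq (s : List Int) : ∀ (acc : List (List Int)) (tmp : List Int),
    tmp.length ≤ 8 →
    (s.foldl stepA (acc, (tmp.length : Int), tmp)).1 = acc ++ chunks9 (tmp ++ s) := by
  induction s with
  | nil =>
    intro acc tmp h
    simp [chunks9_short tmp h]
  | cons v rest ih =>
    intro acc tmp h
    by_cases hlt : tmp.length < 8
    · have hstep : stepA (acc, (tmp.length : Int), tmp) v
          = (acc, ((tmp ++ [v]).length : Int), tmp ++ [v]) := by
        simp [stepA]
        omega
      simp only [List.foldl_cons, hstep, ih acc (tmp ++ [v]) (by simp; omega)]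
      simp
    · have h8 : tmp.length = 8 := by omega
      have hstep : stepA (acc, (tmp.length : Int), tmp) v
          = (acc ++ [tmp ++ [v]], ((([] : List Int)).length : Int), ([] : List Int)) := by
        simp [stepA]
        omega
      simp only [List.foldl_cons, hstep, ih (acc ++ [tmp ++ [v]]) [] (by simp)]
      simp [chunks9_cons8 tmp h8 v rest]

theorem chunks9_eq (s : List Int) :
    chunks9 s = (List.range (s.length / 9)).map (fun k => (s.drop (9 * k)).take 9) := by
  match s with
  | a::b::c::d::e::f::g::h::i::rest =>
    have hlen : (a::b::c::d::e::f::g::h::i::rest).length = 9 + rest.length := by simp; omega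
    simp only [chunks9]
    rw [chunks9_eq rest, hlen]
    have hdiv : (9 + rest.length) / 9 = rest.length / 9 + 1 := by omega
    rw [hdiv, List.range_succ_eq_map]
    simp only [List.map_cons, List.map_map]
    refine congrArg₂ List.cons (by simp) ?_
    apply List.map_congr_left
    intro k _
    simp only [Function.comp]
    have h91 : 9 * (k + 1) = 9 * k + 9 := by omega
    have hd : List.drop (9 * k + 9) (a::b::c::d::e::f::g::h::i::rest) = List.drop (9 * k) rest := by
      show List.drop (9*k+1+1+1+1+1+1+1+1+1) _ = _
      simp only [List.drop_succ_cons]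
    rw [h91, hd]
  | [] | [_] | [_,_] | [_,_,_] | [_,_,_,_] | [_,_,_,_,_] | [_,_,_,_,_,_]
  | [_,_,_,_,_,_,_] | [_,_,_,_,_,_,_,_] =>
    rw [chunks9_short _ (by simp)]
    simp

theorem altB_eq (s : List Int) :
    convert_from_bf_alt s = (List.range (s.length / 9)).map (fun k => (s.drop (9 * k)).take 9) := by
  unfold convert_from_bf_alt
  have h9 : PySem.Int.floordiv (s.length : Int) 9 = ((s.length / 9 : Nat) : Int) := by
    exact_mod_cast PySem.Int.floordiv_natCast s.length 9
  rw [h9, PySem.List.pyRange_one]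
  simp only [List.map_map]
  have hto : (((s.length / 9 : Nat) : Int) - 0).toNat = s.length / 9 := by omega
  rw [hto]
  apply List.map_congr_left
  intro k _
  have hc : ((0 : Int) + (k : Int)) * 9 = ((k * 9 : Nat) : Int) := by push_cast; ring
  simp only [Function.comp, hc]
  have h99 : ((k * 9 : Nat) : Int) + 9 = (((k * 9 + 9 : Nat)) : Int) := by push_cast; ring
  rw [h99, PySem.List.slice_natCast s (k * 9) (k * 9 + 9)]
  have hsub : (k * 9 + 9) - (k * 9) = 9 := by omega
  rw [hsub, Nat.mul_comm k 9]

-- ===== VERDICT (by name: the statement is the Claim_ definition above) =====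
theorem convert_from_bf_spec : Claim_equal_convert_from_bf := by
  intro s _
  show convert_from_bf s = convert_from_bf_alt s
  have := foldA_eq s [] [] (by simp)
  simpa [convert_from_bf, altB_eq, chunks9_eq] using this
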